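-- pv_equiv track=rewrite | github.com/komiamiko/doodads | universal_code/universal_code.py | code_f4_encode
-- ===== SOURCE A (Python) =====
-- def code_f4_encode(n):
--     n += 1
--     if n == 1:return '0'
--     ls = []
--     while n > 1:
--         b = bin(n)[3:]
--         ls.append(b)
--         n = len(b)
--     return '1' + code_f4_encode(len(ls)-1) + ''.join(ls[::-1])
-- ===== SOURCE B (Python) =====
-- def _f4_block(n):
--     # Joined chunk sequence for n (> 1) and the number of chunks, by direct
--     # recursion on len(b) instead of a list-building loop plus reversal.
--     b = format(n, 'b')[1:]
--     if len(b) < 2: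
--         return b, 1
--     rest, c = _f4_block(len(b))
--     return rest + b, c + 1
--
-- def code_f4_encode(n):
--     # Iterative outer structure: collect each level's joined block, then
--     # assemble the code from the inside out by popping the stack.
--     n += 1
--     parts = []
--     while n != 1:
--         body, count = _f4_block(n)
--         parts.append(body)
--         n = count
--     out = '0'
--     while parts:
--         out = '1' + out + parts.pop()
--     return out
-- ===== Notes on version B (the rewrite author's own statement) =====
-- stated objective: alternative
-- what changed: Replaces the self-recursive outer structure by an iterative loop over an explicit stack of level blocks, and replaces the inner list-building while loop plus reversal/join by a direct recursive helper that returns the joined block and chunk count as a pair.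
import Mathlib
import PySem

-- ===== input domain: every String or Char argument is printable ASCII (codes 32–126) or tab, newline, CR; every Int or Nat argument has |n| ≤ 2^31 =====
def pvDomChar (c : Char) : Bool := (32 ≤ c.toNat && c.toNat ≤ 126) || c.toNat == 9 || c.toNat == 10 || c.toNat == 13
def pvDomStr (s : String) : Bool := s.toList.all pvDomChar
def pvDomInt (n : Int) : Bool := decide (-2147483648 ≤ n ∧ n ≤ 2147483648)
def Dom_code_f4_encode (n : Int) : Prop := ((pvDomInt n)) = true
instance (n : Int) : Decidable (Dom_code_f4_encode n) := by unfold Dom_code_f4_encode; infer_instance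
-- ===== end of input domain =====

-- B replaces A's self-recursion by an iterative stack of level blocks, and A's inner
-- list-building loop by a recursive pair-returning helper (same cost, different decomposition).
-- Return-value equivalence is proved on nonnegative inputs.

-- ===== PORT A =====

-- Binary digits of a positive natural, most significant first; for n ≥ 1,
-- Python's bin(n) = "0b" ++ natBin n (exact on positive ints, the only use here).
def natBin (n : Nat) : List Char :=
  if n < 2 then [if n = 1 then '1' else '0']
  else natBin (n / 2) ++ [if n % 2 = 1 then '1' else '0']
decreasing_by exact Nat.div_lt_self (by omega) (by omega)

-- the `while n > 1` loop of A: ls accumulates the chunks (as char lists);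
-- bin(n)[3:] = (natBin n.toNat).drop 1 since bin(n) = "0b" ++ natBin n and [3:] drops 3 chars.
-- fuel bounds the iteration count (the loop value strictly decreases, so n-1 steps suffice).
def aChunks : Nat → Int → List (List Char) → List (List Char)
  | 0, _, ls => ls
  | fuel + 1, n, ls =>
    if n > 1 then
      let b := (natBin n.toNat).drop 1
      aChunks fuel (b.length : Int) (ls ++ [b])
    else ls

-- A's recursion, fuel-bounded (the recursion argument len(ls)-1 strictly decreases below n,
-- so the chosen fuel suffices on nonnegative inputs); ''.join(ls[::-1]) = String.mk (ls.reverse).flatten.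
def aEnc : Nat → Int → String
  | 0, _ => ""  -- fuel exhausted: unreachable on nonnegative inputs with the fuel chosen below
  | fuel + 1, n0 =>
    let n := n0 + 1
    if n == 1 then "0"
    else
      let ls := aChunks n.toNat n []
      "1" ++ aEnc fuel ((ls.length : Int) - 1) ++ String.mk (ls.reverse).flatten

def code_f4_encode (n : Int) : String := aEnc (n.toNat + 1) n

-- ===== PORT B =====

-- termination facts for bTail, cited by its decreasing_by
theorem natBin_length_small (n : Nat) (h : n < 2) : (natBin n).length = 1 := by
  unfold natBin; rw [if_pos h]; simp

theorem natBin_length_le (n : Nat) (h : 1 ≤ n) : (natBin n).length ≤ n := by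
  induction n using Nat.strong_induction_on with
  | _ n ih =>
    unfold natBin
    split
    · simp; omega
    · rename_i h2
      have hd : n / 2 < n := Nat.div_lt_self (by omega) (by omega)
      have := ih (n / 2) hd (by omega)
      simp only [List.length_append, List.length_cons, List.length_nil]
      omega

-- B's recursive helper _f4_block: format(n,'b')[1:] = (natBin n).drop 1; returns the
-- joined chunk sequence (small chunks first) together with the number of chunks.
def bTail (n : Nat) : List Char × Nat :=
  let b := (natBin n).drop 1
  if b.length < 2 then (b, 1)
  else
    let p := bTail b.length
    (p.1 ++ b, p.2 + 1)
decreasing_by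
  rename_i h
  simp only [b, List.length_drop, not_lt] at h
  simp only [List.length_drop]
  have h2 : 2 ≤ n := by
    by_contra hlt
    have := natBin_length_small n (by omega)
    omega
  have := natBin_length_le n (by omega)
  omega

-- B's outer `while n != 1` loop, fuel-bounded: push the joined block, continue with the count.
def bLoop : Nat → Int → List (List Char) → List (List Char)
  | 0, _, parts => parts
  | fuel + 1, n, parts =>
    if n ≠ 1 then
      let bc := bTail n.toNat
      bLoop fuel (bc.2 : Int) (parts ++ [bc.1])
    else parts

-- the final `while parts: out = '1' + out + parts.pop()` loop, as a fold over the
-- reversed stack (popping from the end = left fold over the reverse).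
def code_f4_encode_alt (n : Int) : String :=
  let m := n + 1
  let parts := bLoop m.toNat m []
  parts.reverse.foldl (fun out part => "1" ++ out ++ String.mk part) "0"

-- ===== PRECONDITION & SPEC =====
-- Pre_ excludes negative inputs, on which the Python A recurses without a base case and raises RecursionError.
def Pre_code_f4_encode (n : Int) : Prop := 0 ≤ n
instance (n : Int) : Decidable (Pre_code_f4_encode n) := by unfold Pre_code_f4_encode; infer_instance
def pvWitness_code_f4_encode : Int := (5)

def Spec_code_f4_encode (n : Int) (out : String) : Prop := out = code_f4_encode_alt n
instance (n : Int) (out : String) : Decidable (Spec_code_f4_encode n out) := by unfold Spec_code_f4_encode; infer_instance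

-- ===== CLAIM (what is proved, stated in full; the proofs are below) =====
def Claim_equal_code_f4_encode : Prop := ∀ (n : Int), Dom_code_f4_encode n → Pre_code_f4_encode n → Spec_code_f4_encode n (code_f4_encode n)

-- ===== LEMMAS AND PROOFS =====

theorem natBin_length_pos (n : Nat) : 1 ≤ (natBin n).length := by
  unfold natBin
  split
  · simp
  · simp

theorem natBin_length_ge_two (n : Nat) (h : 2 ≤ n) : 2 ≤ (natBin n).length := by
  unfold natBin
  split
  · omega
  · have := natBin_length_pos (n / 2)
    simp only [List.length_append, List.length_cons, List.length_nil]
    omega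

theorem aChunks_append : ∀ (f : Nat) (n : Int) (ls : List (List Char)),
    aChunks f n ls = ls ++ aChunks f n [] := by
  intro f
  induction f with
  | zero => intro n ls; simp [aChunks]
  | succ f ih =>
    intro n ls
    simp only [aChunks]
    split
    · rw [ih _ (ls ++ _), ih _ ([] ++ _)]
      simp
    · simp

theorem aChunks_length_ge : ∀ (f : Nat) (n : Int) (ls : List (List Char)),
    ls.length ≤ (aChunks f n ls).length := by
  intro f
  induction f with
  | zero => intro n ls; exact le_refl _
  | succ f ih =>
    intro n ls
    simp only [aChunks]
    split
    · have := ih ((((natBin n.toNat).drop 1).length : Nat) : Int) (ls ++ [(natBin n.toNat).drop 1])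
      simp at this ⊢
      omega
    · exact le_refl _

theorem aChunks_length_le : ∀ (c : Nat), 1 ≤ c → ∀ (f : Nat) (ls : List (List Char)),
    c - 1 ≤ f → (aChunks f (c : Int) ls).length ≤ ls.length + (c - 1) := by
  intro c
  induction c using Nat.strong_induction_on with
  | _ c ih =>
    intro hc f ls hf
    match f with
    | 0 =>
      simp only [aChunks]; omega
    | f + 1 =>
      simp only [aChunks]
      split
      · rename_i hgt
        have hc2 : 2 ≤ c := by
          by_contra h
          have hcc : c = 1 := by omega
          rw [hcc] at hgt
          simp at hgt
        have htn : ((c : Int)).toNat = c := by omega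
        rw [htn]
        have hblen : ((natBin c).drop 1).length = (natBin c).length - 1 := by simp
        have hb1 : 1 ≤ ((natBin c).drop 1).length := by
          have := natBin_length_ge_two c hc2; omega
        have hble : ((natBin c).drop 1).length ≤ c - 1 := by
          have := natBin_length_le c (by omega); omega
        have := ih ((natBin c).drop 1).length (by omega) hb1 f (ls ++ [(natBin c).drop 1]) (by omega)
        calc (aChunks f ((((natBin c).drop 1).length : Nat) : Int) (ls ++ [(natBin c).drop 1])).length
            ≤ (ls ++ [(natBin c).drop 1]).length + (((natBin c).drop 1).length - 1) := this
          _ = ls.length + 1 + (((natBin c).drop 1).length - 1) := by simp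
          _ ≤ ls.length + (c - 1) := by omega
      · omega

-- B's recursive helper computes exactly the joined reversal and length of A's chunk list.
theorem bTail_eq_aChunks : ∀ (n : Nat), 2 ≤ n → ∀ (f : Nat), n - 1 ≤ f →
    bTail n = (((aChunks f (n : Int) []).reverse).flatten, (aChunks f (n : Int) []).length) := by
  intro n
  induction n using Nat.strong_induction_on with
  | _ n ih =>
    intro hn f hf
    match f with
    | 0 => omega
    | f + 1 =>
      have hgt : ((n : Int)) > 1 := by omega
      have htn : ((n : Int)).toNat = n := by omega
      rw [aChunks, if_pos hgt, htn]
      set b := (natBin n).drop 1 with hb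
      have hb1 : 1 ≤ b.length := by
        have := natBin_length_ge_two n hn
        simp [hb]; omega
      have hble : b.length ≤ n - 1 := by
        have := natBin_length_le n (by omega)
        simp [hb]; omega
      rw [aChunks_append f _ ([] ++ [b])]
      by_cases hs : b.length < 2
      · -- b.length = 1: the inner chunk list is just [b]
        have hb1' : b.length = 1 := by omega
        have : aChunks f ((b.length : Nat) : Int) [] = [] := by
          rw [hb1']
          match f with
          | 0 => rfl
          | f + 1 => simp [aChunks]
        rw [this]
        rw [bTail, ← hb, if_pos hs]
        simp
      · -- recursive case
        have hs' : 2 ≤ b.length := by omega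
        have := ih b.length (by omega) hs' f (by omega)
        rw [bTail, ← hb, if_neg hs, this]
        simp

theorem bLoop_append : ∀ (f : Nat) (n : Int) (p : List (List Char)),
    bLoop f n p = p ++ bLoop f n [] := by
  intro f
  induction f with
  | zero => intro n p; simp [bLoop]
  | succ f ih =>
    intro n p
    simp only [bLoop]
    split
    · rw [ih _ (p ++ _), ih _ ([] ++ _)]
      simp
    · simp

theorem main_eq : ∀ (k : Nat) (fa fb : Nat), k < fa → k < fb →
    aEnc fa (k : Int) =
      (bLoop fb ((k : Int) + 1) []).reverse.foldl
        (fun out part => "1" ++ out ++ String.mk part) "0" := by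
  intro k
  induction k using Nat.strong_induction_on with
  | _ k ih =>
    intro fa fb hfa hfb
    match fa, fb with
    | fa + 1, fb + 1 =>
      by_cases hk : k = 0
      · subst hk
        simp [aEnc, bLoop]
      · have hk1 : 1 ≤ k := by omega
        simp only [aEnc, bLoop]
        have hne' : ((k : Int) + 1 ≠ 1) := by omega
        rw [if_neg (by simpa using hne'), if_pos hne']
        have htn : ((k : Int) + 1).toNat = k + 1 := by omega
        have hLle : (aChunks ((k : Int) + 1).toNat ((k : Int) + 1) []).length ≤ k := by
          have h2 : ((k + 1 : Nat) : Int) = (k : Int) + 1 := by omega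
          have := aChunks_length_le (k + 1) (by omega) (((k : Int) + 1).toNat) [] (by omega)
          rw [h2] at this
          simpa using this
        have hLge : 1 ≤ (aChunks ((k : Int) + 1).toNat ((k : Int) + 1) []).length := by
          rw [htn]
          have hgt : ((k : Int) + 1) > 1 := by omega
          rw [aChunks, if_pos hgt]
          have := aChunks_length_ge k
            (((natBin ((k : Int) + 1).toNat).drop 1).length : Int)
            ([] ++ [(natBin ((k : Int) + 1).toNat).drop 1])
          simpa using this
        have hbt : bTail ((k : Int) + 1).toNat =
            (((aChunks ((k : Int) + 1).toNat ((k : Int) + 1) []).reverse).flatten,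
             (aChunks ((k : Int) + 1).toNat ((k : Int) + 1) []).length) := by
          rw [htn]
          have h2 : ((k + 1 : Nat) : Int) = (k : Int) + 1 := by omega
          have := bTail_eq_aChunks (k + 1) (by omega) (k + 1) (by omega)
          rw [h2] at this
          exact this
        rw [hbt]
        set ls := aChunks ((k : Int) + 1).toNat ((k : Int) + 1) [] with hls
        have hcast : (ls.length : Int) - 1 = ((ls.length - 1 : Nat) : Int) := by omega
        have hcast2 : ((ls.length - 1 : Nat) : Int) + 1 = (ls.length : Int) := by omega
        rw [bLoop_append, hcast,
          ih (ls.length - 1) (by omega) fa fb (by omega) (by omega), hcast2]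
        simp [List.foldl_append]

-- ===== VERDICT (by name: the statement is the Claim_ definition above) =====
theorem code_f4_encode_spec : Claim_equal_code_f4_encode := by
  intro n _ hpre
  have hn : 0 ≤ n := hpre
  obtain ⟨k, rfl⟩ := Int.eq_ofNat_of_zero_le hn
  show code_f4_encode k = code_f4_encode_alt k
  have h1 : (((k : Nat) : Int) + 1).toNat = k + 1 := by omega
  have h2 : (((k : Nat) : Int)).toNat = k := by omega
  unfold code_f4_encode code_f4_encode_alt
  simp only [h1, h2]
  exact main_eq k (k + 1) (k + 1) (by omega) (by omega)
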